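-- pv_equiv track=rewrite | github.com/manojcpatil/jalgaon-cyclists-club | fetch_strava_activities.py | find_col_index
-- ===== SOURCE A (Python) =====
-- def find_col_index(headers, name_variants):
--     for i, h in enumerate(headers, start=1):
--         for v in name_variants:
--             if h is None:
--                 continue
--             try:
--                 if h.strip().lower() == v.strip().lower():
--                     return i
--             except Exception:
--                 continue
--     return None
-- ===== SOURCE B (Python) =====
-- def find_col_index(headers, name_variants):
--     # Pass 1: index table mapping each normalized header to its first 1-based index.
--     table = {}
--     for i, h in enumerate(headers, start=1):
--         if h is None:
--             continue
--         try:
--             key = h.strip().lower()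
--         except Exception:
--             continue
--         if key not in table:
--             table[key] = i
--     # Pass 2: look up each normalized variant and keep the smallest matched index.
--     best = None
--     for v in name_variants:
--         try:
--             key = v.strip().lower()
--         except Exception:
--             continue
--         idx = table.get(key)
--         if idx is not None and (best is None or idx < best):
--             best = idx
--     return best
-- ===== Notes on version B (the rewrite author's own statement) =====
-- stated objective: faster
-- what changed: B is two staged passes: it first builds a dict from each normalized header to its first 1-based index, then scans the variants once, looking each normalized variant up in the dict and returning the minimum matched index (None if none matched), replacing A's nested scan-and-return-first over headers x variants.
import Mathlib
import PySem

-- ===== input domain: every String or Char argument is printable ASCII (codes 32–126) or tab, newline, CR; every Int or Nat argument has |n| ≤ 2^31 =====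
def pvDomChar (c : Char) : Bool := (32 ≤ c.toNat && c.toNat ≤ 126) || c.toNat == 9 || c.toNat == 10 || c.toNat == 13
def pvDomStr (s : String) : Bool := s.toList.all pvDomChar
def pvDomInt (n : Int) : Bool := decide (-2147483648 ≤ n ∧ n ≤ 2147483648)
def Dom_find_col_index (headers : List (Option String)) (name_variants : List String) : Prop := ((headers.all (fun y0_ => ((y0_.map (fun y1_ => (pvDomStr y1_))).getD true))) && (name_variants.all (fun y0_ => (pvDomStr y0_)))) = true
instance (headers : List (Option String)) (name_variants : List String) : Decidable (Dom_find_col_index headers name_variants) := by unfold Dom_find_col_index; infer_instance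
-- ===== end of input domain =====

-- B replaces A's nested first-match scan by two staged passes: a dict from each
-- normalized header to its first 1-based index, then one scan over the variants
-- taking the minimum matched index (objective: faster).

-- ===== PORT A =====
def pvNorm (s : String) : String := PySem.Str.lower (PySem.Str.strip s)

-- A's inner 'for v in name_variants' loop (with the 'h is None: continue' inside it)
def pvInnerA (h : Option String) (vs : List String) : Bool :=
  match vs with
  | [] => false
  | v :: rest =>
    match h with
    | none => pvInnerA h rest
    | some s => if pvNorm s = pvNorm v then true else pvInnerA h rest

-- A's outer 'for i, h in enumerate(headers, start=1)' loop
def pvLoopA (vs : List String) (i : Int) (hs : List (Option String)) : Option Int :=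
  match hs with
  | [] => none
  | h :: rest => if pvInnerA h vs then some i else pvLoopA vs (i + 1) rest

def find_col_index (headers : List (Option String)) (name_variants : List String) : Option Int :=
  pvLoopA name_variants 1 headers

-- ===== PORT B =====
-- B's pass 1: 'if key not in table: table[key] = i' over enumerate(headers, 1)
def pvBuild (t : PySem.Dict String Int) (i : Int) (hs : List (Option String)) : PySem.Dict String Int :=
  match hs with
  | [] => t
  | none :: rest => pvBuild t (i + 1) rest
  | some s :: rest =>
    pvBuild (if PySem.Dict.contains t (pvNorm s) then t else PySem.Dict.insert t (pvNorm s) i)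
      (i + 1) rest

-- B's pass 2: look up each variant, keep the smallest matched index in 'best'
def pvBest (t : PySem.Dict String Int) (best : Option Int) (vs : List String) : Option Int :=
  match vs with
  | [] => best
  | v :: rest =>
    match PySem.Dict.get? t (pvNorm v) with
    | none => pvBest t best rest
    | some j =>
      match best with
      | none => pvBest t (some j) rest
      | some b => pvBest t (if j < b then some j else some b) rest

def find_col_index_alt (headers : List (Option String)) (name_variants : List String) : Option Int :=
  pvBest (pvBuild PySem.Dict.empty 1 headers) none name_variants

-- ===== PRECONDITION & SPEC =====
def Spec_find_col_index (headers : List (Option String)) (name_variants : List String) (out : Option Int) : Prop := out = find_col_index_alt headers name_variants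
instance (headers : List (Option String)) (name_variants : List String) (out : Option Int) : Decidable (Spec_find_col_index headers name_variants out) := by unfold Spec_find_col_index; infer_instance

-- ===== CLAIM (what is proved, stated in full; the proofs are below) =====
def Claim_equal_find_col_index : Prop := ∀ (headers : List (Option String)) (name_variants : List String), Dom_find_col_index headers name_variants → Spec_find_col_index headers name_variants (find_col_index headers name_variants)

-- ===== LEMMAS AND PROOFS =====

-- first index ≥ i at which a header normalizes to k (proof-only reference function)
def pvFirstKey (i : Int) (hs : List (Option String)) (k : String) : Option Int :=
  match hs with
  | [] => none
  | none :: rest => pvFirstKey (i + 1) rest k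
  | some s :: rest => if pvNorm s = k then some i else pvFirstKey (i + 1) rest k

-- the min-accumulating fold underlying pvBest, over an abstract lookup list
def pvOptMin (best : Option Int) (l : List (Option Int)) : Option Int :=
  match l with
  | [] => best
  | none :: rest => pvOptMin best rest
  | some j :: rest =>
    pvOptMin (match best with | none => some j | some b => if j < b then some j else some b) rest

theorem pvInnerA_none (vs : List String) : pvInnerA none vs = false := by
  induction vs with
  | nil => rfl
  | cons v rest ih => simpa [pvInnerA] using ih

theorem pvInnerA_some (s : String) (vs : List String) :
    pvInnerA (some s) vs = vs.any (fun v => pvNorm s == pvNorm v) := by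
  induction vs with
  | nil => rfl
  | cons v rest ih =>
    simp only [pvInnerA, List.any_cons]
    by_cases h : pvNorm s = pvNorm v
    · simp [h]
    · simp [h, ih]

theorem pvFirstKey_ge (hs : List (Option String)) (i j : Int) (k : String)
    (h : pvFirstKey i hs k = some j) : i ≤ j := by
  induction hs generalizing i with
  | nil => simp [pvFirstKey] at h
  | cons hd rest ih =>
    cases hd with
    | none => have := ih (i + 1) (by simpa [pvFirstKey] using h); omega
    | some s =>
      simp only [pvFirstKey] at h
      by_cases he : pvNorm s = k
      · simp [he] at h; omega
      · have := ih (i + 1) (by simpa [he] using h); omega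

theorem pvBuild_get? (hs : List (Option String)) (t : PySem.Dict String Int) (i : Int)
    (k : String) : (pvBuild t i hs).get? k = (t.get? k).or (pvFirstKey i hs k) := by
  induction hs generalizing t i with
  | nil => simp [pvBuild, pvFirstKey]
  | cons hd rest ih =>
    cases hd with
    | none => simp [pvBuild, pvFirstKey, ih]
    | some s =>
      simp only [pvBuild, pvFirstKey]
      by_cases hc : PySem.Dict.contains t (pvNorm s)
      · rw [if_pos hc, ih]
        by_cases he : pvNorm s = k
        · subst he
          have : ∃ v, t.get? (pvNorm s) = some v := by
            rcases h' : t.get? (pvNorm s) with _ | v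
            · rw [PySem.Dict.get?_eq_none_iff_contains] at h'
              simp [h'] at hc
            · exact ⟨v, rfl⟩
          rcases this with ⟨v, hv⟩
          simp [hv]
        · simp [he]
      · rw [if_neg hc, ih]
        have ht : t.get? (pvNorm s) = none := by
          rw [PySem.Dict.get?_eq_none_iff_contains]
          simpa using hc
        by_cases he : pvNorm s = k
        · subst he
          simp [PySem.Dict.get?_insert_self, ht]
        · rw [PySem.Dict.get?_insert, if_neg (fun h => he h.symm)]
          simp [he]

theorem pvBest_eq (vs : List String) (t : PySem.Dict String Int) (best : Option Int) :
    pvBest t best vs = pvOptMin best (vs.map (fun v => t.get? (pvNorm v))) := by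
  induction vs generalizing best with
  | nil => rfl
  | cons v rest ih =>
    cases h : PySem.Dict.get? t (pvNorm v) with
    | none => simp [pvBest, pvOptMin, h, ih]
    | some j => cases best <;> simp [pvBest, pvOptMin, h, ih]

theorem pvOptMin_all_none (l : List (Option Int)) (best : Option Int)
    (h : ∀ x ∈ l, x = none) : pvOptMin best l = best := by
  induction l with
  | nil => rfl
  | cons x rest ih =>
    have hx := h x (by simp)
    subst hx
    exact ih (fun y hy => h y (by simp [hy]))

theorem pvOptMin_min (i : Int) (l : List (Option Int)) (best : Option Int)
    (hge : ∀ x ∈ l, ∀ j, x = some j → i ≤ j)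
    (hmem : some i ∈ l ∨ best = some i)
    (hbest : ∀ b, best = some b → i ≤ b) : pvOptMin best l = some i := by
  induction l generalizing best with
  | nil =>
    rcases hmem with h | h
    · simp at h
    · simpa [pvOptMin] using h
  | cons x rest ih =>
    have hge' : ∀ x ∈ rest, ∀ j, x = some j → i ≤ j :=
      fun y hy => hge y (List.mem_cons_of_mem _ hy)
    cases x with
    | none =>
      have hmem' : some i ∈ rest ∨ best = some i := by
        rcases hmem with h | h
        · rcases List.mem_cons.mp h with h | h
          · exact absurd h (by simp)
          · exact Or.inl h
        · exact Or.inr h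
      simpa only [pvOptMin] using ih best hge' hmem' hbest
    | some j =>
      have hj : i ≤ j := hge (some j) (by simp) j rfl
      cases best with
      | none =>
        simp only [pvOptMin]
        refine ih (some j) hge' ?_ ?_
        · rcases hmem with h | h
          · rcases List.mem_cons.mp h with h | h
            · simp only [Option.some.injEq] at h
              exact Or.inr (by simp [h])
            · exact Or.inl h
          · simp at h
        · intro b hb
          simp only [Option.some.injEq] at hb
          omega
      | some b =>
        have hb : i ≤ b := hbest b rfl
        simp only [pvOptMin]
        refine ih (if j < b then some j else some b) hge' ?_ ?_
        · rcases hmem with h | h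
          · rcases List.mem_cons.mp h with h | h
            · simp only [Option.some.injEq] at h
              right
              by_cases hc : i < b
              · simp [← h, hc]
              · have hbi : b = i := by omega
                rw [← h, if_neg (by omega), hbi]
            · exact Or.inl h
          · simp only [Option.some.injEq] at h
            right
            have hnl : ¬ j < b := by omega
            rw [if_neg hnl, h]
        · intro b' hb'
          by_cases hc : j < b
          · rw [if_pos hc] at hb'
            simp only [Option.some.injEq] at hb'
            omega
          · rw [if_neg hc] at hb'
            simp only [Option.some.injEq] at hb'
            omega

theorem pvLoopA_eq_optMin (hs : List (Option String)) (vs : List String) (i : Int) :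
    pvLoopA vs i hs = pvOptMin none (vs.map (fun v => pvFirstKey i hs (pvNorm v))) := by
  induction hs generalizing i with
  | nil =>
    simp only [pvLoopA]
    rw [pvOptMin_all_none]
    intro x hx
    rcases List.mem_map.mp hx with ⟨v, _, hv⟩
    simpa [pvFirstKey] using hv.symm
  | cons hd rest ih =>
    cases hd with
    | none =>
      have hN : pvInnerA none vs = false := pvInnerA_none vs
      simp only [pvLoopA, hN, Bool.false_eq_true, if_false, pvFirstKey]
      exact ih (i + 1)
    | some s =>
      simp only [pvLoopA]
      by_cases hm : pvInnerA (some s) vs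
      · rw [if_pos hm]
        rw [pvInnerA_some] at hm
        rcases List.any_eq_true.mp hm with ⟨v, hv, hveq⟩
        have hveq' : pvNorm s = pvNorm v := by simpa using hveq
        symm
        refine pvOptMin_min i _ none ?_ ?_ (by simp)
        · intro x hx j hj
          rcases List.mem_map.mp hx with ⟨w, _, hw⟩
          subst hj
          simp only [pvFirstKey] at hw
          by_cases he : pvNorm s = pvNorm w
          · rw [if_pos he] at hw; simp at hw; omega
          · rw [if_neg he] at hw
            have := pvFirstKey_ge rest (i + 1) j (pvNorm w) hw
            omega
        · left
          refine List.mem_map.mpr ⟨v, hv, ?_⟩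
          simp [pvFirstKey, hveq']
      · rw [if_neg hm]
        rw [pvInnerA_some] at hm
        have hall : ∀ v ∈ vs, pvNorm s ≠ pvNorm v := by
          intro v hv he
          exact hm (List.any_eq_true.mpr ⟨v, hv, by simp [he]⟩)
        have hmapeq : (vs.map fun v => pvFirstKey i (some s :: rest) (pvNorm v))
            = vs.map fun v => pvFirstKey (i + 1) rest (pvNorm v) := by
          refine List.map_congr_left fun v hv => ?_
          simp [pvFirstKey, hall v hv]
        rw [hmapeq]
        exact ih (i + 1)

-- ===== VERDICT (by name: the statement is the Claim_ definition above) =====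
theorem find_col_index_spec : Claim_equal_find_col_index := by
  intro headers name_variants _
  unfold Spec_find_col_index find_col_index find_col_index_alt
  rw [pvBest_eq, pvLoopA_eq_optMin]
  have hmap : (name_variants.map fun v => (pvBuild PySem.Dict.empty 1 headers).get? (pvNorm v))
      = name_variants.map fun v => pvFirstKey 1 headers (pvNorm v) := by
    refine List.map_congr_left fun v _ => ?_
    rw [pvBuild_get?, PySem.Dict.get?_empty, Option.none_or]
  rw [hmap]
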